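-- pv_equiv track=rewrite | github.com/fjkiani/crispro-backend-v2 | api/services/resistance/config/timing_config.py | get_regimen_biomarker_class
-- ===== SOURCE A (Python) =====
-- from typing import Optional
--
-- REGIMEN_TYPE_CLASSIFICATIONS = {
--     "platinum": ["platinum", "carboplatin", "cisplatin", "oxaliplatin"],
--     "PARPi": ["PARPi", "olaparib", "niraparib", "rucaparib", "talazoparib"],
--     "ATR_inhibitor": ["ATRi", "ATR_inhibitor", "berzosertib", "ceralasertib"],
--     "WEE1_inhibitor": ["WEE1i", "WEE1_inhibitor", "adavosertib"],
--     "other_ddr_targeted": ["other_ddr_targeted", "CHK1", "POLQ", "DNA_PK"],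
--     "non_platinum_chemo": ["taxane", "anthracycline", "alkylating_agent", "antimetabolite"],
--     "IO": ["PD1", "PDL1", "CTLA4", "checkpoint_inhibitor"],
-- }
--
-- def get_regimen_biomarker_class(regimen_type: str) -> Optional[str]:
--     """
--     Map regimen type to biomarker class (PARPi, ATRi, WEE1i, Other_DDRi).
--
--     Args:
--         regimen_type: Regimen type string
--
--     Returns:
--         Biomarker class string or None if not DDR-targeted
--     """
--     if not regimen_type:
--         return None
--
--     regimen_lower = regimen_type.lower()
--
--     # Check each DDR class
--     for ddr_class, type_list in REGIMEN_TYPE_CLASSIFICATIONS.items():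
--         if ddr_class in ["PARPi", "ATR_inhibitor", "WEE1_inhibitor", "other_ddr_targeted"]:
--             if regimen_lower in [r.lower() for r in type_list]:
--                 if ddr_class == "ATR_inhibitor":
--                     return "ATRi"
--                 elif ddr_class == "WEE1_inhibitor":
--                     return "WEE1i"
--                 elif ddr_class == "other_ddr_targeted":
--                     return "Other_DDRi"
--                 else:
--                     return ddr_class
--
--     return None
-- ===== SOURCE B (Python) =====
-- _DDR_ALIAS_TABLE = {
--     "parpi": "PARPi", "olaparib": "PARPi", "niraparib": "PARPi",
--     "rucaparib": "PARPi", "talazoparib": "PARPi",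
--     "atri": "ATRi", "atr_inhibitor": "ATRi", "berzosertib": "ATRi",
--     "ceralasertib": "ATRi",
--     "wee1i": "WEE1i", "wee1_inhibitor": "WEE1i", "adavosertib": "WEE1i",
--     "other_ddr_targeted": "Other_DDRi", "chk1": "Other_DDRi",
--     "polq": "Other_DDRi", "dna_pk": "Other_DDRi",
-- }
--
-- def get_regimen_biomarker_class(regimen_type):
--     if not regimen_type:
--         return None
--     return _DDR_ALIAS_TABLE.get(regimen_type.lower())
-- ===== Notes on version B (the rewrite author's own statement) =====
-- stated objective: simpler
-- what changed: Replaces the loop over all seven regimen classes (with its per-class membership filter, per-item lowercasing comprehension and relabeling if-chain) by one module-level flat dict from lowercased DDR aliases directly to their output labels, so the body is a single table lookup.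
import Mathlib
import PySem

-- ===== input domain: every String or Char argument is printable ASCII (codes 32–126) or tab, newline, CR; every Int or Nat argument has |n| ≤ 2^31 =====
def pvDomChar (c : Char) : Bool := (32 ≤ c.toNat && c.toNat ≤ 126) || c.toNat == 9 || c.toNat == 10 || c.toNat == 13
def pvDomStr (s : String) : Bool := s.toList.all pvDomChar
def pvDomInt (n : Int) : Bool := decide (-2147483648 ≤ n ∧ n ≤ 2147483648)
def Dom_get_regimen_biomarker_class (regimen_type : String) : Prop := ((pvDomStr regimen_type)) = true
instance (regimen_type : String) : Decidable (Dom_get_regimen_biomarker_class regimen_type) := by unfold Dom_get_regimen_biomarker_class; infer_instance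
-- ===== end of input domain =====

-- B replaces A's loop over the seven regimen classes by a prebuilt flat alias→label dict lookup (simpler).

-- ===== PORT A =====
def pvRegimenTypeClassifications : List (String × List String) :=
  [("platinum", ["platinum", "carboplatin", "cisplatin", "oxaliplatin"]),
   ("PARPi", ["PARPi", "olaparib", "niraparib", "rucaparib", "talazoparib"]),
   ("ATR_inhibitor", ["ATRi", "ATR_inhibitor", "berzosertib", "ceralasertib"]),
   ("WEE1_inhibitor", ["WEE1i", "WEE1_inhibitor", "adavosertib"]),
   ("other_ddr_targeted", ["other_ddr_targeted", "CHK1", "POLQ", "DNA_PK"]),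
   ("non_platinum_chemo", ["taxane", "anthracycline", "alkylating_agent", "antimetabolite"]),
   ("IO", ["PD1", "PDL1", "CTLA4", "checkpoint_inhibitor"])]

-- the `for ddr_class, type_list in …:` loop with its early returns
def pvLoopA (regimen_lower : String) : List (String × List String) → Option String
  | [] => none
  | (ddr_class, type_list) :: rest =>
    if ["PARPi", "ATR_inhibitor", "WEE1_inhibitor", "other_ddr_targeted"].contains ddr_class then
      if (type_list.map PySem.Str.lower).contains regimen_lower then
        if ddr_class = "ATR_inhibitor" then some "ATRi"
        else if ddr_class = "WEE1_inhibitor" then some "WEE1i"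
        else if ddr_class = "other_ddr_targeted" then some "Other_DDRi"
        else some ddr_class
      else pvLoopA regimen_lower rest
    else pvLoopA regimen_lower rest

def get_regimen_biomarker_class (regimen_type : String) : Option String :=
  if regimen_type = "" then none
  else
    let regimen_lower := PySem.Str.lower regimen_type
    pvLoopA regimen_lower pvRegimenTypeClassifications

-- ===== PORT B =====
def pvDdrAliasTable : PySem.Dict String String := PySem.Dict.mk
  [("parpi", "PARPi"), ("olaparib", "PARPi"), ("niraparib", "PARPi"),
   ("rucaparib", "PARPi"), ("talazoparib", "PARPi"),
   ("atri", "ATRi"), ("atr_inhibitor", "ATRi"), ("berzosertib", "ATRi"),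
   ("ceralasertib", "ATRi"),
   ("wee1i", "WEE1i"), ("wee1_inhibitor", "WEE1i"), ("adavosertib", "WEE1i"),
   ("other_ddr_targeted", "Other_DDRi"), ("chk1", "Other_DDRi"),
   ("polq", "Other_DDRi"), ("dna_pk", "Other_DDRi")]

def get_regimen_biomarker_class_alt (regimen_type : String) : Option String :=
  if regimen_type = "" then none
  else PySem.Dict.get? pvDdrAliasTable (PySem.Str.lower regimen_type)

-- ===== PRECONDITION & SPEC =====
def Spec_get_regimen_biomarker_class (regimen_type : String) (out : Option String) : Prop := out = get_regimen_biomarker_class_alt regimen_type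
instance (regimen_type : String) (out : Option String) : Decidable (Spec_get_regimen_biomarker_class regimen_type out) := by unfold Spec_get_regimen_biomarker_class; infer_instance

-- ===== CLAIM (what is proved, stated in full; the proofs are below) =====
def Claim_equal_get_regimen_biomarker_class : Prop := ∀ (regimen_type : String), Dom_get_regimen_biomarker_class regimen_type → Spec_get_regimen_biomarker_class regimen_type (get_regimen_biomarker_class regimen_type)

-- ===== LEMMAS AND PROOFS =====

-- one loop step on a class the DDR filter rejects
theorem pvLoopA_skip (l ddr : String) (tl : List String) (rest : List (String × List String))
    (h : (["PARPi", "ATR_inhibitor", "WEE1_inhibitor", "other_ddr_targeted"].contains ddr) = false) :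
    pvLoopA l ((ddr, tl) :: rest) = pvLoopA l rest := by
  simp only [pvLoopA, h, Bool.false_eq_true, if_false]

-- one loop step on a class the DDR filter keeps
theorem pvLoopA_ddr (l ddr : String) (tl : List String) (rest : List (String × List String))
    (h : (["PARPi", "ATR_inhibitor", "WEE1_inhibitor", "other_ddr_targeted"].contains ddr) = true) :
    pvLoopA l ((ddr, tl) :: rest) =
      if (tl.map PySem.Str.lower).contains l then
        (if ddr = "ATR_inhibitor" then some "ATRi"
         else if ddr = "WEE1_inhibitor" then some "WEE1i"
         else if ddr = "other_ddr_targeted" then some "Other_DDRi"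
         else some ddr)
      else pvLoopA l rest := by
  simp only [pvLoopA, h, if_true]

-- the two lookup chains agree for every lowered string
set_option maxHeartbeats 1600000 in
theorem pvLoop_eq_table (l : String) :
    pvLoopA l pvRegimenTypeClassifications = PySem.Dict.get? pvDdrAliasTable l := by
  have hP : (["PARPi", "olaparib", "niraparib", "rucaparib", "talazoparib"].map PySem.Str.lower)
      = ["parpi", "olaparib", "niraparib", "rucaparib", "talazoparib"] := by decide
  have hA : (["ATRi", "ATR_inhibitor", "berzosertib", "ceralasertib"].map PySem.Str.lower)
      = ["atri", "atr_inhibitor", "berzosertib", "ceralasertib"] := by decide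
  have hW : (["WEE1i", "WEE1_inhibitor", "adavosertib"].map PySem.Str.lower)
      = ["wee1i", "wee1_inhibitor", "adavosertib"] := by decide
  have hO : (["other_ddr_targeted", "CHK1", "POLQ", "DNA_PK"].map PySem.Str.lower)
      = ["other_ddr_targeted", "chk1", "polq", "dna_pk"] := by decide
  rw [pvRegimenTypeClassifications,
    pvLoopA_skip l _ _ _ (by decide),
    pvLoopA_ddr l _ _ _ (by decide),
    pvLoopA_ddr l _ _ _ (by decide),
    pvLoopA_ddr l _ _ _ (by decide),
    pvLoopA_ddr l _ _ _ (by decide),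
    pvLoopA_skip l _ _ _ (by decide),
    pvLoopA_skip l _ _ _ (by decide)]
  simp only [hP, hA, hW, hO, String.reduceEq, if_true, if_false, pvLoopA,
    List.contains_cons, List.contains_nil, beq_iff_eq, Bool.or_eq_true,
    Bool.false_eq_true, or_false, pvDdrAliasTable, PySem.Dict.get?_mk_cons]
  by_cases h1 : l = "parpi" ∨ l = "olaparib" ∨ l = "niraparib" ∨ l = "rucaparib" ∨ l = "talazoparib"
  · rw [if_pos h1]; rcases h1 with h | h | h | h | h <;> subst h <;> decide
  rw [if_neg h1]
  by_cases h2 : l = "atri" ∨ l = "atr_inhibitor" ∨ l = "berzosertib" ∨ l = "ceralasertib"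
  · rw [if_pos h2]; rcases h2 with h | h | h | h <;> subst h <;> decide
  rw [if_neg h2]
  by_cases h3 : l = "wee1i" ∨ l = "wee1_inhibitor" ∨ l = "adavosertib"
  · rw [if_pos h3]; rcases h3 with h | h | h <;> subst h <;> decide
  rw [if_neg h3]
  by_cases h4 : l = "other_ddr_targeted" ∨ l = "chk1" ∨ l = "polq" ∨ l = "dna_pk"
  · rw [if_pos h4]; rcases h4 with h | h | h | h <;> subst h <;> decide
  rw [if_neg h4]
  push Not at h1 h2 h3 h4
  obtain ⟨a1, a2, a3, a4, a5⟩ := h1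
  obtain ⟨b1, b2, b3, b4⟩ := h2
  obtain ⟨c1, c2, c3⟩ := h3
  obtain ⟨d1, d2, d3, d4⟩ := h4
  rw [if_neg (Ne.symm a1), if_neg (Ne.symm a2), if_neg (Ne.symm a3), if_neg (Ne.symm a4),
    if_neg (Ne.symm a5), if_neg (Ne.symm b1), if_neg (Ne.symm b2), if_neg (Ne.symm b3),
    if_neg (Ne.symm b4), if_neg (Ne.symm c1), if_neg (Ne.symm c2), if_neg (Ne.symm c3),
    if_neg (Ne.symm d1), if_neg (Ne.symm d2), if_neg (Ne.symm d3), if_neg (Ne.symm d4)]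
  rfl

-- ===== VERDICT (by name: the statement is the Claim_ definition above) =====
theorem get_regimen_biomarker_class_spec : Claim_equal_get_regimen_biomarker_class := by
  intro s _
  unfold Spec_get_regimen_biomarker_class get_regimen_biomarker_class get_regimen_biomarker_class_alt
  split
  · rfl
  · exact pvLoop_eq_table (PySem.Str.lower s)
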